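-- pv_equiv track=rewrite | github.com/Logikkaa/DMS_chapterwise_codes | Chap_8_App/6.py | find_universal_addresses
-- ===== SOURCE A (Python) =====
-- class TreeNode:
--     def __init__(self, value):
--         self.value = value
--         self.children = []
--
-- def find_universal_addresses(edges):
--     tree = {}
--     for parent, child in edges:
--         if parent not in tree:
--             tree[parent] = TreeNode(parent)
--         if child not in tree:
--             tree[child] = TreeNode(child)
--         tree[parent].children.append(tree[child])
--
--     addresses = []
--
--     def dfs(node, prefix):
--         addresses.append(prefix + [node.value])
--         for idx, child in enumerate(node.children):
--             dfs(child, prefix + [node.value] + [idx])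
--
--     dfs(tree[1], [])
--     return addresses
--
-- edges = [(1, 2), (1, 3), (2, 4), (2, 5), (3, 6)]
--
-- addresses = find_universal_addresses(edges)
-- ===== SOURCE B (Python) =====
-- def find_universal_addresses(edges):
--     children = {}
--     for parent, child in edges:
--         children.setdefault(parent, []).append(child)
--         children.setdefault(child, [])
--
--     addresses = []
--     stack = [(1, [])]
--     while stack:
--         node, prefix = stack.pop()
--         path = prefix + [node]
--         addresses.append(path)
--         for idx, ch in reversed(list(enumerate(children[node]))):
--             stack.append((ch, path + [idx]))
--     return addresses
-- ===== Notes on version B (the rewrite author's own statement) =====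
-- stated objective: alternative
-- what changed: Replaces the TreeNode object graph plus recursive DFS closure with a plain child-list dict and an explicit stack of (node, prefix) frames, pushing children in reverse so the iterative loop emits the identical preorder address list.
import Mathlib
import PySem

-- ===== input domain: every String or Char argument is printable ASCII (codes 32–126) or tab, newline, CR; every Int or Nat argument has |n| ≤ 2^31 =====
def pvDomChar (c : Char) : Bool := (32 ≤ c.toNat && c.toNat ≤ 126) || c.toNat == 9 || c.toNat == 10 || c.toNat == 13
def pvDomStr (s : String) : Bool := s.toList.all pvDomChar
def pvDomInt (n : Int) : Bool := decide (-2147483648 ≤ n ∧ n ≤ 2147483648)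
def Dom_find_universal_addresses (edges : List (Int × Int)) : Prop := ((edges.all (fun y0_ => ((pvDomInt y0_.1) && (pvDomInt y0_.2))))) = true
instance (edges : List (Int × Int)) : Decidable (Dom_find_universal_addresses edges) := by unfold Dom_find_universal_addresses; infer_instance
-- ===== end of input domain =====

-- B replaces A's TreeNode object graph + recursive DFS closure by a child-list dict and an
-- explicit stack of (node, prefix) frames (objective: alternative decomposition, same cost).

-- ===== PORT A =====
-- A's dict of mutable TreeNode objects is modelled as a dict node ↦ list of child VALUES:
-- all mutation (children.append) happens before the DFS reads anything, and a TreeNode is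
-- observed only through .value and .children, so this is exact.
def pvTreeA (edges : List (Int × Int)) : PySem.Dict Int (List Int) :=
  edges.foldl
    (fun d e =>
      let d := if d.contains e.1 then d else d.insert e.1 []   -- if parent not in tree: tree[parent] = TreeNode(parent)
      let d := if d.contains e.2 then d else d.insert e.2 []   -- if child not in tree: tree[child] = TreeNode(child)
      d.modify e.1 [] (fun cs => cs ++ [e.2]))                 -- tree[parent].children.append(tree[child])
    PySem.Dict.empty

-- A's recursive dfs; recursion depth is bounded by the fuel (first argument): the initial fuel
-- 2*|edges|+1 exceeds any path length in an acyclic reachable graph, so on inputs where the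
-- Python returns (Pre_) the fuel is never exhausted (on a reachable cycle Python recurses
-- without bound: excluded by Pre_).
def pvDfsA (d : PySem.Dict Int (List Int)) : Nat → Int → List Int → List (List Int) → List (List Int)
  | 0, _, _, acc => acc
  | Nat.succ f, v, p, acc =>
      (PySem.List.enumerate (d.getD v [])).foldl
        (fun acc ic => pvDfsA d f ic.2 (p ++ [v] ++ [ic.1]) acc)
        (acc ++ [p ++ [v]])

def find_universal_addresses (edges : List (Int × Int)) : List (List Int) :=
  pvDfsA (pvTreeA edges) (2 * edges.length + 1) 1 [] []

-- ===== PORT B =====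
def pvChildrenB (edges : List (Int × Int)) : PySem.Dict Int (List Int) :=
  edges.foldl
    (fun d e =>
      let d := (d.setdefault e.1 []).modify e.1 [] (fun cs => cs ++ [e.2])  -- children.setdefault(parent, []).append(child)
      d.setdefault e.2 [])                                                  -- children.setdefault(child, [])
    PySem.Dict.empty

-- termination measure of the stack loop: sum of per-frame weights K^fuel
def pvMeasureB (d : PySem.Dict Int (List Int)) (stack : List (Nat × Int × List Int)) : Nat :=
  (stack.map (fun fr => ((d.values.map List.length).sum + 1) ^ fr.1)).sum

theorem pvKids_len_le (d : PySem.Dict Int (List Int)) (v : Int) :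
    (d.getD v []).length ≤ (d.values.map List.length).sum := by
  rcases h : d.get? v with _ | l
  · rw [PySem.Dict.getD_of_get?_eq_none d [] h]; simp
  · rw [PySem.Dict.getD_of_get?_eq_some d [] h]
    have hm : l ∈ d.values := by
      have hit := PySem.Dict.mem_items_of_get?_eq_some d h
      simp only [PySem.Dict.values]
      exact List.mem_map_of_mem (f := fun p => p.2) hit
    exact List.single_le_sum (by simp) _ (List.mem_map_of_mem (f := List.length) hm)

theorem pvMeasureB_dec (d : PySem.Dict Int (List Int)) (f : Nat) (v : Int) (p : List Int)
    (rest : List (Nat × Int × List Int)) :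
    pvMeasureB d ((PySem.List.enumerate (d.getD v [])).map
        (fun ic => (f, ic.2, p ++ [v] ++ [ic.1])) ++ rest)
      < pvMeasureB d ((f + 1, v, p) :: rest) := by
  unfold pvMeasureB
  set K := (d.values.map List.length).sum + 1 with hK
  have hlen : (d.getD v []).length + 1 ≤ K := by
    have := pvKids_len_le d v; omega
  have hsum : ((((PySem.List.enumerate (d.getD v [])).map
      (fun ic => (f, ic.2, p ++ [v] ++ [ic.1]))).map (fun fr => K ^ fr.1)).sum)
      = (d.getD v []).length * K ^ f := by
    rw [List.map_map]
    have : ∀ (l : List (Int × Int)),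
        (l.map ((fun fr => K ^ fr.1) ∘ (fun ic : Int × Int => (f, ic.2, p ++ [v] ++ [ic.1])))).sum
          = l.length * K ^ f := by
      intro l
      induction l with
      | nil => simp
      | cons a l ih =>
          simp only [List.map_cons, List.sum_cons, Function.comp_apply, ih, List.length_cons]
          ring
    rw [this, PySem.List.length_enumerate]
  have hK1 : 1 ≤ K ^ f := Nat.one_le_pow _ _ (by omega)
  have hlt : (d.getD v []).length * K ^ f < K ^ (f + 1) := by
    have h1 : ((d.getD v []).length + 1) * K ^ f ≤ K * K ^ f :=
      Nat.mul_le_mul hlen (le_refl _)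
    have h2 : K ^ (f + 1) = K * K ^ f := by ring
    have h3 : ((d.getD v []).length + 1) * K ^ f
        = (d.getD v []).length * K ^ f + K ^ f := by ring
    omega
  simp only [List.map_append, List.sum_append, List.map_cons, List.sum_cons]
  rw [hsum]
  omega

-- B's while-stack loop; frames carry (fuel, node, prefix): the fuel component exists only to
-- bound the loop (inside Pre_ it is never exhausted), the data flow is exactly Source B's.
def pvLoopB (d : PySem.Dict Int (List Int)) :
    List (Nat × Int × List Int) → List (List Int) → List (List Int)
  | [], acc => acc
  | (0, _, _) :: rest, acc => pvLoopB d rest acc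
  | (Nat.succ f, v, p) :: rest, acc =>
      pvLoopB d
        ((PySem.List.enumerate (d.getD v [])).map (fun ic => (f, ic.2, p ++ [v] ++ [ic.1])) ++ rest)
        (acc ++ [p ++ [v]])
  termination_by stack _ => pvMeasureB d stack
  decreasing_by
  · simp only [pvMeasureB, List.map_cons, List.sum_cons, pow_zero]; omega
  · exact pvMeasureB_dec d f v p rest

def find_universal_addresses_alt (edges : List (Int × Int)) : List (List Int) :=
  pvLoopB (pvChildrenB edges) [(2 * edges.length + 1, 1, [])] []

-- ===== PRECONDITION & SPEC =====
-- Pre_ helpers (used by neither port): successor lists and a bounded reachability closure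
def pvSuccsP (edges : List (Int × Int)) (v : Int) : List Int :=
  (edges.filter (fun e => e.1 = v)).map (fun e => e.2)

def pvReachP (edges : List (Int × Int)) : Nat → List Int → List Int
  | 0, vs => vs
  | Nat.succ n, vs => pvReachP edges n ((vs ++ vs.flatMap (pvSuccsP edges)).dedup)

-- Pre_ excludes exactly the inputs where the Python A raises: KeyError when node 1 occurs in no
-- edge, and unbounded recursion (RecursionError) when a directed cycle is reachable from node 1.
def Pre_find_universal_addresses (edges : List (Int × Int)) : Prop :=
  (∃ e ∈ edges, e.1 = 1 ∨ e.2 = 1) ∧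
  ∀ v ∈ pvReachP edges (2 * edges.length) [(1 : Int)],
    v ∉ pvReachP edges (2 * edges.length) (pvSuccsP edges v)

instance (edges : List (Int × Int)) : Decidable (Pre_find_universal_addresses edges) := by
  unfold Pre_find_universal_addresses; infer_instance

def pvWitness_find_universal_addresses : (List (Int × Int)) := [(1, 2), (1, 3), (2, 4)]

def Spec_find_universal_addresses (edges : List (Int × Int)) (out : List (List Int)) : Prop := out = find_universal_addresses_alt edges
instance (edges : List (Int × Int)) (out : List (List Int)) : Decidable (Spec_find_universal_addresses edges out) := by unfold Spec_find_universal_addresses; infer_instance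

-- ===== CLAIM (what is proved, stated in full; the proofs are below) =====
def Claim_equal_find_universal_addresses : Prop := ∀ (edges : List (Int × Int)), Dom_find_universal_addresses edges → Pre_find_universal_addresses edges → Spec_find_universal_addresses edges (find_universal_addresses edges)

-- ===== LEMMAS AND PROOFS =====

-- getD · [] is untouched by setdefault · []
theorem pvGetD_setdefault (d : PySem.Dict Int (List Int)) (k x : Int) :
    (d.setdefault k []).getD x [] = d.getD x [] := by
  rcases h : d.contains k with _ | _
  · rw [PySem.Dict.setdefault_of_not_contains d [] h, PySem.Dict.getD_insert]
    split
    · next heq => subst heq; rw [PySem.Dict.getD_of_not_contains d [] h]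
    · rfl
  · rw [PySem.Dict.setdefault_of_contains d [] h]

-- getD · [] is untouched by A's conditional insert of an empty node
theorem pvGetD_condInsert (d : PySem.Dict Int (List Int)) (k x : Int) :
    (if d.contains k then d else d.insert k []).getD x [] = d.getD x [] := by
  rcases h : d.contains k with _ | _
  · simp only [Bool.false_eq_true, if_false]
    rw [PySem.Dict.getD_insert]
    split
    · next heq => subst heq; rw [PySem.Dict.getD_of_not_contains d [] h]
    · rfl
  · simp

-- both builds change getD · [] in the same way at every step, so the folds agree pointwise
theorem pvBuild_getD_eq_aux (edges : List (Int × Int)) :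
    ∀ (d d' : PySem.Dict Int (List Int)), (∀ v, d.getD v [] = d'.getD v []) →
      ∀ v, (edges.foldl
              (fun d e =>
                let d := if d.contains e.1 then d else d.insert e.1 []
                let d := if d.contains e.2 then d else d.insert e.2 []
                d.modify e.1 [] (fun cs => cs ++ [e.2])) d).getD v []
          = (edges.foldl
              (fun d e =>
                let d := (d.setdefault e.1 []).modify e.1 [] (fun cs => cs ++ [e.2])
                d.setdefault e.2 []) d').getD v [] := by
  induction edges with
  | nil => intro d d' h v; simpa using h v
  | cons e es ih =>
      intro d d' h v
      simp only [List.foldl_cons]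
      apply ih
      intro w
      dsimp only
      rw [PySem.Dict.getD_modify, pvGetD_condInsert, pvGetD_condInsert, pvGetD_condInsert,
          pvGetD_condInsert, pvGetD_setdefault, PySem.Dict.getD_modify, pvGetD_setdefault, pvGetD_setdefault]
      simp only [h]

theorem pvBuild_getD_eq (edges : List (Int × Int)) (v : Int) :
    (pvTreeA edges).getD v [] = (pvChildrenB edges).getD v [] := by
  unfold pvTreeA pvChildrenB
  exact pvBuild_getD_eq_aux edges _ _ (fun _ => rfl) v

-- dfs reads the dict only through getD · []
theorem pvDfsA_congr (d d' : PySem.Dict Int (List Int))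
    (h : ∀ v, d.getD v [] = d'.getD v []) :
    ∀ f v p acc, pvDfsA d f v p acc = pvDfsA d' f v p acc := by
  intro f
  induction f with
  | zero => intro v p acc; rfl
  | succ f ih =>
      intro v p acc
      simp only [pvDfsA]
      rw [h v]
      congr 1
      funext acc ic
      exact ih _ _ _

-- the stack loop computes the fold of the recursive dfs over the stack
theorem pvLoopB_eq_foldl (d : PySem.Dict Int (List Int)) :
    ∀ stack acc, pvLoopB d stack acc
      = stack.foldl (fun acc fr => pvDfsA d fr.1 fr.2.1 fr.2.2 acc) acc := by
  intro stack acc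
  induction stack, acc using pvLoopB.induct d with
  | case1 acc => rw [pvLoopB]; rfl
  | case2 v p rest acc ih =>
      rw [pvLoopB, ih]
      rfl
  | case3 f v p rest acc ih =>
      rw [pvLoopB, ih]
      simp only [List.foldl_append, List.foldl_map, List.foldl_cons, pvDfsA]

-- ===== VERDICT (by name: the statement is the Claim_ definition above) =====
theorem find_universal_addresses_spec : Claim_equal_find_universal_addresses := by
  intro edges _ _
  unfold Spec_find_universal_addresses find_universal_addresses find_universal_addresses_alt
  rw [pvLoopB_eq_foldl]
  simp only [List.foldl_cons, List.foldl_nil]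
  exact pvDfsA_congr _ _ (pvBuild_getD_eq edges) _ _ _ _
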